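-- pv_equiv track=rewrite | github.com/Poljopodrska/ava-olo-agricultural-core | modules/cava/routes.py | extract_question_type_from_message
-- ===== SOURCE A (Python) =====
-- def extract_question_type_from_message(message: str) -> str:
--     """Extract what type of question was asked from a message"""
--     msg_lower = message.lower()
--
--     if any(phrase in msg_lower for phrase in ["first name", "your name", "may i have your name", "what's your name", "what is your name"]):
--         return "first_name"
--     elif any(phrase in msg_lower for phrase in ["last name", "surname", "family name"]):
--         return "last_name"
--     elif any(phrase in msg_lower for phrase in ["whatsapp", "phone", "number", "contact"]):
--         return "whatsapp"
--     elif any(phrase in msg_lower for phrase in ["password", "create a password", "choose a password"]):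
--         return "password"
--     else:
--         return "unknown"
-- ===== SOURCE B (Python) =====
-- # B: flatten every keyword phrase into (phrase, priority) pairs, scan them ALL
-- # (no early-exit cascade), keeping the minimum priority of any phrase that
-- # occurs in the lowercased message; the priority then indexes a label table.
-- PHRASES = [
--     ("first name", 0), ("your name", 0), ("may i have your name", 0),
--     ("what's your name", 0), ("what is your name", 0),
--     ("last name", 1), ("surname", 1), ("family name", 1),
--     ("whatsapp", 2), ("phone", 2), ("number", 2), ("contact", 2),
--     ("password", 3), ("create a password", 3), ("choose a password", 3),
-- ]
-- LABELS = ["first_name", "last_name", "whatsapp", "password", "unknown"]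
--
-- def extract_question_type_from_message(message: str) -> str:
--     """Extract what type of question was asked from a message"""
--     m = message.lower()
--     best = 4
--     for phrase, idx in PHRASES:
--         if idx < best and phrase in m:
--             best = idx
--     return LABELS[best]
-- ===== Notes on version B (the rewrite author's own statement) =====
-- stated objective: alternative
-- what changed: A's if/elif cascade over phrase groups with early return becomes a single full scan over a flat (phrase, priority) list that accumulates the minimum matching priority, then indexes a label table; correct because each group's label wins exactly when its priority is the smallest matched one.
import Mathlib
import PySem

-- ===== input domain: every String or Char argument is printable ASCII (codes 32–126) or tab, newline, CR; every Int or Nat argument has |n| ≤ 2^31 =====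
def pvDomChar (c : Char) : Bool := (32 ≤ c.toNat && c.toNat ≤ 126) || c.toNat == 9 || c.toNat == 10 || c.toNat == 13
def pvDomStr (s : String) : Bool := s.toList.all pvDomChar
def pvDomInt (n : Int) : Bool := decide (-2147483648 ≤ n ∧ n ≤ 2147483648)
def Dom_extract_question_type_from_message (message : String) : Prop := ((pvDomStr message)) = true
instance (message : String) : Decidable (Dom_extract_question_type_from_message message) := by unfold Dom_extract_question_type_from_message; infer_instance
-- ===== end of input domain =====

-- B replaces A's early-return if/elif cascade by a full scan over a flat (phrase, priority)
-- list accumulating the minimum matching priority, then indexing a label table (objective: alternative).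

-- ===== PORT A =====
def extract_question_type_from_message (message : String) : String :=
  let msg_lower := PySem.Str.lower message
  if (["first name", "your name", "may i have your name", "what's your name", "what is your name"].any
      (fun phrase => PySem.Str.isIn phrase msg_lower)) then "first_name"
  else if (["last name", "surname", "family name"].any
      (fun phrase => PySem.Str.isIn phrase msg_lower)) then "last_name"
  else if (["whatsapp", "phone", "number", "contact"].any
      (fun phrase => PySem.Str.isIn phrase msg_lower)) then "whatsapp"
  else if (["password", "create a password", "choose a password"].any
      (fun phrase => PySem.Str.isIn phrase msg_lower)) then "password"
  else "unknown"

-- ===== PORT B =====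
def pvPhrases : List (String × Nat) :=
  [("first name", 0), ("your name", 0), ("may i have your name", 0),
   ("what's your name", 0), ("what is your name", 0),
   ("last name", 1), ("surname", 1), ("family name", 1),
   ("whatsapp", 2), ("phone", 2), ("number", 2), ("contact", 2),
   ("password", 3), ("create a password", 3), ("choose a password", 3)]

def pvLabels : List String := ["first_name", "last_name", "whatsapp", "password", "unknown"]

def extract_question_type_from_message_alt (message : String) : String :=
  let m := PySem.Str.lower message
  let best : Nat := pvPhrases.foldl
    (fun best pi => if pi.2 < best ∧ PySem.Str.isIn pi.1 m then pi.2 else best) 4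
  -- LABELS[best]: best is always in range, Python indexing never raises here
  (PySem.List.pyGet? pvLabels (best : Int)).getD "unknown"

-- ===== PRECONDITION & SPEC =====
def Spec_extract_question_type_from_message (message : String) (out : String) : Prop := out = extract_question_type_from_message_alt message
instance (message : String) (out : String) : Decidable (Spec_extract_question_type_from_message message out) := by unfold Spec_extract_question_type_from_message; infer_instance

-- ===== CLAIM (what is proved, stated in full; the proofs are below) =====
def Claim_equal_extract_question_type_from_message : Prop := ∀ (message : String), Dom_extract_question_type_from_message message → Spec_extract_question_type_from_message message (extract_question_type_from_message message)

-- ===== LEMMAS AND PROOFS =====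

-- the step function of B's fold
def pvStep (m : String) (best : Nat) (pi : String × Nat) : Nat :=
  if pi.2 < best ∧ PySem.Str.isIn pi.1 m then pi.2 else best

-- once the accumulator is ≤ i, a block of phrases all tagged i leaves it unchanged
theorem pvFold_stay (m : String) (i b : Nat) (h : ¬ i < b) (ps : List String) :
    (ps.map (fun p => (p, i))).foldl (pvStep m) b = b := by
  induction ps with
  | nil => rfl
  | cons p ps ih =>
      simp only [List.map_cons, List.foldl_cons]
      have hstep : pvStep m b (p, i) = b := if_neg (by tauto)
      rw [hstep]
      exact ih

-- folding a block of phrases all tagged i computes "i if i<b and any phrase matches, else b"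
theorem pvFold_block (m : String) (i : Nat) (ps : List String) (b : Nat) :
    (ps.map (fun p => (p, i))).foldl (pvStep m) b
      = if i < b ∧ ps.any (fun p => PySem.Str.isIn p m) then i else b := by
  induction ps generalizing b with
  | nil => simp
  | cons p ps ih =>
      simp only [List.map_cons, List.foldl_cons]
      have hstep : pvStep m b (p, i) = if i < b ∧ PySem.Str.isIn p m then i else b := rfl
      rw [hstep]
      by_cases hc : i < b ∧ PySem.Str.isIn p m = true
      · rw [if_pos hc, pvFold_stay m i i (by omega),
            if_pos (⟨hc.1, by simp only [List.any_cons, hc.2, Bool.true_or]⟩ :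
              i < b ∧ ((p :: ps).any fun p => PySem.Str.isIn p m) = true)]
      · rw [if_neg hc, ih b]
        have hiff : (i < b ∧ ((p :: ps).any fun p => PySem.Str.isIn p m) = true)
            ↔ (i < b ∧ (ps.any fun p => PySem.Str.isIn p m) = true) := by
          simp only [List.any_cons, Bool.or_eq_true]
          tauto
        rw [if_congr hiff rfl rfl]

-- the flat phrase table is the concatenation of the four tagged groups
theorem pvPhrases_eq :
    pvPhrases =
      (["first name", "your name", "may i have your name", "what's your name", "what is your name"].map (fun p => (p, 0)))
      ++ (["last name", "surname", "family name"].map (fun p => (p, 1)))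
      ++ (["whatsapp", "phone", "number", "contact"].map (fun p => (p, 2)))
      ++ (["password", "create a password", "choose a password"].map (fun p => (p, 3))) := by
  rfl

-- ===== VERDICT (by name: the statement is the Claim_ definition above) =====
theorem extract_question_type_from_message_spec : Claim_equal_extract_question_type_from_message := by
  intro message _
  show extract_question_type_from_message message = extract_question_type_from_message_alt message
  simp only [extract_question_type_from_message, extract_question_type_from_message_alt]
  generalize PySem.Str.lower message = m
  have hf : (fun (best : Nat) (pi : String × Nat) =>
        if pi.2 < best ∧ PySem.Str.isIn pi.1 m then pi.2 else best) = pvStep m := rfl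
  rw [hf, pvPhrases_eq, List.foldl_append, List.foldl_append, List.foldl_append,
      pvFold_block, pvFold_block, pvFold_block, pvFold_block]
  rcases Bool.eq_false_or_eq_true (["first name", "your name", "may i have your name", "what's your name", "what is your name"].any (fun p => PySem.Str.isIn p m)) with h0 | h0 <;>
  rcases Bool.eq_false_or_eq_true (["last name", "surname", "family name"].any (fun p => PySem.Str.isIn p m)) with h1 | h1 <;>
  rcases Bool.eq_false_or_eq_true (["whatsapp", "phone", "number", "contact"].any (fun p => PySem.Str.isIn p m)) with h2 | h2 <;>
  rcases Bool.eq_false_or_eq_true (["password", "create a password", "choose a password"].any (fun p => PySem.Str.isIn p m)) with h3 | h3 <;>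
  rw [h0, h1, h2, h3] <;> rfl
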